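-- pv_equiv track=rewrite | github.com/AbhiCogito/100-days-of-code-python | Week 2/Love Calculator.py | calculate_love_score
-- ===== SOURCE A (Python) =====
-- def calculate_love_score(name1, name2):
--     true = "true"
--     love = "love"
--     name = (name1 + name2).lower() #lovesophie
--     score1 = 0
--     score2 = 0
--     for x in true:
--         for y in name:
--             if x == y:
--                 score1 += 1
--
--     for x in love:
--         for y in name:
--             if x == y:
--                 score2 += 1
--     return(score1, score2)
-- ===== SOURCE B (Python) =====
-- def calculate_love_score(name1, name2):
--     # Single pass over the lowercased concatenation: each character bumps the
--     # score of every keyword it belongs to (letters within "true" and "love"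
--     # are distinct, so membership equals the per-letter count).
--     score1 = 0
--     score2 = 0
--     for c in (name1 + name2).lower():
--         if c in "true":
--             score1 += 1
--         if c in "love":
--             score2 += 1
--     return (score1, score2)
-- ===== Notes on version B (the rewrite author's own statement) =====
-- stated objective: simpler
-- what changed: Inverts the loop structure: a single pass over the lowercased concatenation with a two-score accumulator, incrementing on membership in 'true'/'love' (valid since each keyword has distinct letters), instead of A's eight full scans of the name, one per keyword letter.
import Mathlib
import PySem

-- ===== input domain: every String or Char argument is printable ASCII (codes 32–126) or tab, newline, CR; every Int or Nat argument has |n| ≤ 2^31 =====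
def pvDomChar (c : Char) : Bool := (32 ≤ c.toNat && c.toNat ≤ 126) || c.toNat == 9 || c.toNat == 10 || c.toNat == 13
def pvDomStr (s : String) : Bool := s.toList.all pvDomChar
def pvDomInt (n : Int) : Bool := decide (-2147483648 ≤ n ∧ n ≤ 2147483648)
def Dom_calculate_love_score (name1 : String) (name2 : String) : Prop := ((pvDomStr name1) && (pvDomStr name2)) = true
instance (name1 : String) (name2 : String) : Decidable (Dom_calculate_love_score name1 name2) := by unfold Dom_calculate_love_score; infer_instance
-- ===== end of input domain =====

-- B makes a single pass over the lowercased name with a two-score accumulator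
-- (membership in "true"/"love" per character) instead of A's eight scans; objective: simpler.

-- ===== PORT A =====
def calculate_love_score (name1 : String) (name2 : String) : Int × Int :=
  let tru := "true".toList
  let love := "love".toList
  let name := (PySem.Str.lower (name1 ++ name2)).toList
  let score1 : Int :=
    tru.foldl (fun s1 x => name.foldl (fun s y => if x == y then s + 1 else s) s1) 0
  let score2 : Int :=
    love.foldl (fun s2 x => name.foldl (fun s y => if x == y then s + 1 else s) s2) 0
  (score1, score2)

-- ===== PORT B =====
def calculate_love_score_alt (name1 : String) (name2 : String) : Int × Int :=
  (PySem.Str.lower (name1 ++ name2)).toList.foldl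
    (fun p c =>
      (if "true".toList.contains c then p.1 + 1 else p.1,
       if "love".toList.contains c then p.2 + 1 else p.2))
    ((0 : Int), (0 : Int))

-- ===== PRECONDITION & SPEC =====
def Spec_calculate_love_score (name1 : String) (name2 : String) (out : Int × Int) : Prop := out = calculate_love_score_alt name1 name2
instance (name1 : String) (name2 : String) (out : Int × Int) : Decidable (Spec_calculate_love_score name1 name2 out) := by unfold Spec_calculate_love_score; infer_instance

-- ===== CLAIM (what is proved, stated in full; the proofs are below) =====
def Claim_equal_calculate_love_score : Prop := ∀ (name1 : String) (name2 : String), Dom_calculate_love_score name1 name2 → Spec_calculate_love_score name1 name2 (calculate_love_score name1 name2)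

-- ===== LEMMAS AND PROOFS =====

-- A's inner scan adds the count of x in name.
lemma pv_inner (x : Char) (name : List Char) (a : Int) :
    name.foldl (fun s y => if x == y then s + 1 else s) a = a + name.count x := by
  induction name generalizing a with
  | nil => simp
  | cons h t ih =>
    rw [List.foldl_cons, ih, List.count_cons]
    by_cases hx : (x == h) = true
    · rw [if_pos hx, if_pos (beq_iff_eq.mpr (beq_iff_eq.mp hx).symm)]; push_cast; ring
    · rw [if_neg hx, if_neg (fun h2 => hx (beq_iff_eq.mpr (beq_iff_eq.mp h2).symm))]; push_cast; ring

-- A's outer loop sums those counts over the keyword letters.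
lemma pv_outer (ws name : List Char) (a : Int) :
    ws.foldl (fun s1 x => name.foldl (fun s y => if x == y then s + 1 else s) s1) a
      = a + (ws.map (fun c => (name.count c : Int))).sum := by
  induction ws generalizing a with
  | nil => simp
  | cons w t ih =>
    rw [List.foldl_cons, pv_inner, ih, List.map_cons, List.sum_cons]
    ring

-- B's single pass returns, in each component, the number of name characters
-- belonging to the keyword.
lemma pv_alt_fold (name : List Char) (a b : Int) :
    name.foldl
      (fun p c =>
        (if "true".toList.contains c then p.1 + 1 else p.1,
         if "love".toList.contains c then p.2 + 1 else p.2)) (a, b)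
      = (a + (name.map (fun c => if "true".toList.contains c then (1:Int) else 0)).sum,
         b + (name.map (fun c => if "love".toList.contains c then (1:Int) else 0)).sum) := by
  induction name generalizing a b with
  | nil => simp
  | cons h t ih =>
    rw [List.foldl_cons]
    dsimp only
    rw [ih]
    simp only [List.map_cons, List.sum_cons, Prod.mk.injEq]
    constructor <;> split_ifs <;> ring

-- For a keyword with distinct letters, a character's membership indicator equals
-- the sum of per-letter equality counts (specialised to the two literal words).
lemma pv_ind_true (name : List Char) :
    ("true".toList.map (fun c => (name.count c : Int))).sum
      = (name.map (fun c => if "true".toList.contains c then (1:Int) else 0)).sum := by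
  induction name with
  | nil => simp
  | cons h t ih =>
    simp only [List.map_cons, List.sum_cons, List.count_cons, ← ih]
    by_cases h1 : h = 't' <;> by_cases h2 : h = 'r' <;> by_cases h3 : h = 'u' <;>
      by_cases h4 : h = 'e' <;> simp_all <;> omega

lemma pv_ind_love (name : List Char) :
    ("love".toList.map (fun c => (name.count c : Int))).sum
      = (name.map (fun c => if "love".toList.contains c then (1:Int) else 0)).sum := by
  induction name with
  | nil => simp
  | cons h t ih =>
    simp only [List.map_cons, List.sum_cons, List.count_cons, ← ih]
    by_cases h1 : h = 'l' <;> by_cases h2 : h = 'o' <;> by_cases h3 : h = 'v' <;>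
      by_cases h4 : h = 'e' <;> simp_all <;> omega

-- ===== VERDICT (by name: the statement is the Claim_ definition above) =====
theorem calculate_love_score_spec : Claim_equal_calculate_love_score := by
  intro name1 name2 _
  unfold Spec_calculate_love_score calculate_love_score calculate_love_score_alt
  simp only [pv_alt_fold, pv_outer, pv_ind_true, pv_ind_love, zero_add]
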